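-- pv_equiv track=rewrite | github.com/ftakanashi/JobProjects | LeetCode/2021.街上最亮的位置/main.py | brightestPosition
-- ===== SOURCE A (Python) =====
-- from typing import List
-- from collections import defaultdict
--
-- def brightestPosition(lights: List[List[int]]) -> int:
--     diff = defaultdict(int)
--     for center, r in lights:
--         left, right = center - r, center + r
--         diff[left] += 1
--         diff[right + 1] -= 1
--
--     ans_pos, ans_s = None, 0
--     s = 0
--     for pos in sorted(diff):
--         s += diff[pos]
--         if s > ans_s:
--             ans_s, ans_pos = s, pos
--     return ans_pos
-- ===== SOURCE B (Python) =====
-- def brightestPosition(lights):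
--     # Brute-force over candidate positions: the answer (if any) is always a
--     # left endpoint, so evaluate the brightness at each left endpoint directly.
--     ans_pos, ans_s = None, 0
--     for p in sorted(c - r for c, r in lights):
--         s = sum((c - r <= p) - (c + r < p) for c, r in lights)
--         if s > ans_s:
--             ans_pos, ans_s = p, s
--     return ans_pos
-- ===== Notes on version B (the rewrite author's own statement) =====
-- stated objective: simpler
-- what changed: Replaces the defaultdict difference-map plus sorted-key prefix-sum sweep by a direct brute force: scan the sorted left endpoints (the only possible answers) and recompute the brightness at each candidate from scratch by counting starts/ends at or before it.
-- outside the precondition, e.g. on brightestPosition([]): A returns None, B returns None; on brightestPosition([[0, -1]]): A returns None, B returns None; on brightestPosition([[0], [1, 2, 3]]): A raises ValueError, B raises ValueError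
import Mathlib
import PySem

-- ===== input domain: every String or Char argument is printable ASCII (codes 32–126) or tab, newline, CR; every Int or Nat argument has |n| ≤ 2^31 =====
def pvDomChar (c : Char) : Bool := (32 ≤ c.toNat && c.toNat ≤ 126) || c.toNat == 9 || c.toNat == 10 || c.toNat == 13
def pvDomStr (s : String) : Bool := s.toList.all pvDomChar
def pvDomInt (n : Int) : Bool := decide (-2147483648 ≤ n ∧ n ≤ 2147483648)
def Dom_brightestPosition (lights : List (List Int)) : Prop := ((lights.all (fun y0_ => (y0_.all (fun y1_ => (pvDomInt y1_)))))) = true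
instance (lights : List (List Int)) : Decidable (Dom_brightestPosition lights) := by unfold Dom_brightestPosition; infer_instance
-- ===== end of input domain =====

-- B replaces A's defaultdict difference map + sorted-key prefix-sum sweep by a plain
-- brute force over the sorted left endpoints, recomputing the brightness at each
-- candidate directly (simpler; asymptotically slower, O(n^2) vs O(n log n)).

-- ===== PORT A =====
def brightestPosition (lights : List (List Int)) : Int :=
  -- 'for center, r in lights' raises ValueError unless every row has length 2;
  -- Pre_ requires that, so the pyGetD defaults below are never taken.
  let diff : PySem.Dict Int Int :=
    lights.foldl (fun d light =>
      let center := PySem.List.pyGetD light 0 0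
      let r := PySem.List.pyGetD light 1 0
      let left := center - r
      let right := center + r
      (d.modify left 0 (· + 1)).modify (right + 1) 0 (· + (-1))) PySem.Dict.empty
  let res :=
    (PySem.List.sorted diff.keys (fun x => x) false).foldl
      (fun (st : Option Int × Int × Int) pos =>
        let s := st.2.2 + diff.getD pos 0
        if s > st.2.1 then (some pos, s, s) else (st.1, st.2.1, s))
      (none, 0, 0)
  -- the Python returns None exactly when the update never fired; Pre_ excludes that
  res.1.getD 0

-- ===== PORT B =====
-- port of B's 'sum((c - r <= p) - (c + r < p) for c, r in lights)'
def brightness (lights : List (List Int)) (p : Int) : Int :=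
  (lights.map (fun light =>
    let c := PySem.List.pyGetD light 0 0
    let r := PySem.List.pyGetD light 1 0
    (if c - r ≤ p then (1 : Int) else 0) - (if c + r < p then (1 : Int) else 0))).sum

def brightestPosition_alt (lights : List (List Int)) : Int :=
  let res :=
    (PySem.List.sorted (lights.map (fun light =>
        PySem.List.pyGetD light 0 0 - PySem.List.pyGetD light 1 0)) (fun x => x) false).foldl
      (fun (st : Option Int × Int) p =>
        let s := brightness lights p
        if s > st.2 then (some p, s) else st)
      (none, 0)
  res.1.getD 0

-- ===== PRECONDITION & SPEC =====
-- Pre_ excludes (i) inputs with a row of length ≠ 2, on which A raises ValueError, and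
-- (ii) inputs on which no position has positive brightness, where A returns None,
-- which is not a value of the declared int type (B returns None there as well).
def Pre_brightestPosition (lights : List (List Int)) : Prop :=
  (∀ l ∈ lights, PySem.List.len l = 2) ∧
  (∃ l ∈ lights, 0 < brightness lights (PySem.List.pyGetD l 0 0 - PySem.List.pyGetD l 1 0))
instance (lights : List (List Int)) : Decidable (Pre_brightestPosition lights) := by
  unfold Pre_brightestPosition; infer_instance

def pvWitness_brightestPosition : List (List Int) := [[0, 0]]

def Spec_brightestPosition (lights : List (List Int)) (out : Int) : Prop := out = brightestPosition_alt lights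
instance (lights : List (List Int)) (out : Int) : Decidable (Spec_brightestPosition lights out) := by unfold Spec_brightestPosition; infer_instance

-- ===== CLAIM (what is proved, stated in full; the proofs are below) =====
def Claim_equal_brightestPosition : Prop := ∀ (lights : List (List Int)), Dom_brightestPosition lights → Pre_brightestPosition lights → Spec_brightestPosition lights (brightestPosition lights)

-- ===== LEMMAS AND PROOFS =====

-- left endpoint of a light and the coordinate just past its right endpoint
def lft (l : List Int) : Int := PySem.List.pyGetD l 0 0 - PySem.List.pyGetD l 1 0
def fin (l : List Int) : Int := PySem.List.pyGetD l 0 0 + PySem.List.pyGetD l 1 0 + 1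

-- net event weight A's dict stores at coordinate k
def delta (lights : List (List Int)) (k : Int) : Int :=
  (lights.map (fun l => (if lft l = k then (1 : Int) else 0) + (if fin l = k then (-1 : Int) else 0))).sum

-- prefix sum of event weights over a set P of processed coordinates
def gsum (lights : List (List Int)) (P : List Int) : Int :=
  (lights.map (fun l => (if lft l ∈ P then (1 : Int) else 0) - (if fin l ∈ P then (1 : Int) else 0))).sum

-- A's dict, named (definitionally the dict built inside brightestPosition)
def diffD (lights : List (List Int)) : PySem.Dict Int Int :=
  lights.foldl (fun d light =>
    (d.modify (PySem.List.pyGetD light 0 0 - PySem.List.pyGetD light 1 0) 0 (· + 1)).modify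
      (PySem.List.pyGetD light 0 0 + PySem.List.pyGetD light 1 0 + 1) 0 (· + (-1))) PySem.Dict.empty

-- the generic strict-argmax fold both ports end with
def amax (f : Int → Int) (st : Option Int × Int) (zs : List Int) : Option Int × Int :=
  zs.foldl (fun st p => let s := f p; if s > st.2 then (some p, s) else st) st

lemma brightness_eq (lights : List (List Int)) (p : Int) :
    brightness lights p
      = (lights.map (fun l => (if lft l ≤ p then (1 : Int) else 0) - (if fin l ≤ p then (1 : Int) else 0))).sum := by
  unfold brightness lft fin
  refine congrArg List.sum (List.map_congr_left ?_)
  intro l _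
  dsimp only
  split_ifs <;> omega

lemma step_getD (d : PySem.Dict Int Int) (a b k : Int) :
    ((d.modify a 0 (· + 1)).modify b 0 (· + (-1))).getD k 0
      = d.getD k 0 + ((if a = k then (1 : Int) else 0) + (if b = k then (-1 : Int) else 0)) := by
  rcases eq_or_ne k b with hb | hb <;> rcases eq_or_ne k a with ha | ha
  · subst hb; subst ha
    simp
  · subst hb
    simp [PySem.Dict.getD_modify, Ne.symm ha]; omega
  · subst ha
    simp [PySem.Dict.getD_modify, hb]; omega
  · simp [PySem.Dict.getD_modify, hb, ha, Ne.symm ha]; omega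

lemma getD_diffD (lights : List (List Int)) (k : Int) :
    (diffD lights).getD k 0 = delta lights k := by
  suffices h : ∀ (ls : List (List Int)) (d : PySem.Dict Int Int),
      (ls.foldl (fun d light =>
        (d.modify (PySem.List.pyGetD light 0 0 - PySem.List.pyGetD light 1 0) 0 (· + 1)).modify
          (PySem.List.pyGetD light 0 0 + PySem.List.pyGetD light 1 0 + 1) 0 (· + (-1))) d).getD k 0
        = d.getD k 0 + delta ls k by
    have := h lights PySem.Dict.empty
    simpa [diffD, PySem.Dict.getD_empty] using this
  intro ls
  induction ls with
  | nil => intro d; simp [delta]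
  | cons light tl ih =>
    intro d
    rw [List.foldl_cons, ih, step_getD]
    simp only [delta, List.map_cons, List.sum_cons, lft, fin]
    omega

lemma mem_keys_diffD (lights : List (List Int)) (k : Int) :
    k ∈ (diffD lights).keys ↔ ∃ l ∈ lights, lft l = k ∨ fin l = k := by
  suffices h : ∀ (ls : List (List Int)) (d : PySem.Dict Int Int),
      k ∈ (ls.foldl (fun d light =>
        (d.modify (PySem.List.pyGetD light 0 0 - PySem.List.pyGetD light 1 0) 0 (· + 1)).modify
          (PySem.List.pyGetD light 0 0 + PySem.List.pyGetD light 1 0 + 1) 0 (· + (-1))) d).keys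
        ↔ k ∈ d.keys ∨ ∃ l ∈ ls, lft l = k ∨ fin l = k by
    have := h lights PySem.Dict.empty
    simpa [diffD, PySem.Dict.keys_empty] using this
  intro ls
  induction ls with
  | nil => intro d; simp
  | cons light tl ih =>
    intro d
    rw [List.foldl_cons, ih]
    simp only [PySem.Dict.keys_modify, PySem.Dict.mem_keys_insert, List.mem_cons, lft, fin]
    constructor
    · rintro ((h | h | h) | ⟨l, hl, hlk⟩)
      · exact Or.inr ⟨light, Or.inl rfl, Or.inr h.symm⟩
      · exact Or.inr ⟨light, Or.inl rfl, Or.inl h.symm⟩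
      · exact Or.inl h
      · exact Or.inr ⟨l, Or.inr hl, hlk⟩
    · rintro (h | ⟨l, rfl | hl, hlk⟩)
      · exact Or.inl (Or.inr (Or.inr h))
      · rcases hlk with h | h
        · exact Or.inl (Or.inr (Or.inl h.symm))
        · exact Or.inl (Or.inl h.symm)
      · exact Or.inr ⟨l, hl, hlk⟩

lemma nodup_keys_diffD (lights : List (List Int)) : (diffD lights).keys.Nodup := by
  suffices h : ∀ (ls : List (List Int)) (d : PySem.Dict Int Int), d.keys.Nodup →
      (ls.foldl (fun d light =>
        (d.modify (PySem.List.pyGetD light 0 0 - PySem.List.pyGetD light 1 0) 0 (· + 1)).modify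
          (PySem.List.pyGetD light 0 0 + PySem.List.pyGetD light 1 0 + 1) 0 (· + (-1))) d).keys.Nodup by
    exact h lights PySem.Dict.empty (by simp [PySem.Dict.keys_empty])
  intro ls
  induction ls with
  | nil => intro d hd; simpa using hd
  | cons light tl ih =>
    intro d hd
    rw [List.foldl_cons]
    apply ih
    rw [PySem.Dict.keys_modify]
    apply PySem.Dict.nodup_keys_insert
    rw [PySem.Dict.keys_modify]
    exact PySem.Dict.nodup_keys_insert _ _ _ hd

lemma mem_split {x k : Int} {lo tl : List Int}
    (hp : (lo ++ k :: tl).Pairwise (· < ·)) (hx : x ∈ lo ++ k :: tl) :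
    ((if x ∈ lo then (1 : Int) else 0) + (if x = k then (1 : Int) else 0))
      = (if x ≤ k then (1 : Int) else 0) := by
  rcases List.pairwise_append.mp hp with ⟨h1, h2, h3⟩
  rcases List.mem_append.mp hx with hlo | hct
  · have hxk : x < k := h3 x hlo k (List.mem_cons_self)
    simp [hlo, le_of_lt hxk, ne_of_lt hxk]
  · rcases List.mem_cons.mp hct with rfl | htl
    · have hnlo : x ∉ lo := fun h => absurd (h3 x h x (List.mem_cons_self)) (lt_irrefl x)
      simp [hnlo]
    · have hkx : k < x := (List.pairwise_cons.mp h2).1 x htl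
      have hnlo : x ∉ lo := fun h => by
        have := h3 x h k (List.mem_cons_self); omega
      simp [hnlo, ne_of_gt hkx, not_le.mpr hkx]

lemma mem_snoc_split {x k : Int} {lo tl : List Int}
    (hp : (lo ++ k :: tl).Pairwise (· < ·)) (hx : x ∈ lo ++ k :: tl) :
    (if x ∈ lo ++ [k] then (1 : Int) else 0) = (if x ≤ k then (1 : Int) else 0) := by
  have h := mem_split hp hx
  have hk : k ∉ lo := by
    rcases List.pairwise_append.mp hp with ⟨_, _, h3⟩
    exact fun hmem => absurd (h3 k hmem k (List.mem_cons_self)) (lt_irrefl k)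
  by_cases hxlo : x ∈ lo <;> by_cases hxk : x = k <;>
    simp [List.mem_append, hxlo, hxk, hk] at h ⊢ <;> omega

lemma gsum_step (lights : List (List Int)) (lo tl : List Int) (k : Int)
    (hp : (lo ++ k :: tl).Pairwise (· < ·))
    (hc : ∀ l ∈ lights, lft l ∈ lo ++ k :: tl ∧ fin l ∈ lo ++ k :: tl) :
    gsum lights lo + delta lights k = brightness lights k := by
  rw [brightness_eq, gsum, delta, ← PySem.List.sum_map_add_int]
  refine congrArg List.sum (List.map_congr_left ?_)
  intro l hl
  have h1 := mem_split hp (hc l hl).1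
  have h2 := mem_split hp (hc l hl).2
  split_ifs at h1 h2 ⊢ <;> omega

lemma gsum_snoc (lights : List (List Int)) (lo tl : List Int) (k : Int)
    (hp : (lo ++ k :: tl).Pairwise (· < ·))
    (hc : ∀ l ∈ lights, lft l ∈ lo ++ k :: tl ∧ fin l ∈ lo ++ k :: tl) :
    gsum lights (lo ++ [k]) = brightness lights k := by
  rw [brightness_eq, gsum]
  refine congrArg List.sum (List.map_congr_left ?_)
  intro l hl
  have h1 := mem_snoc_split hp (hc l hl).1
  have h2 := mem_snoc_split hp (hc l hl).2
  split_ifs at h1 h2 ⊢ <;> omega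

lemma gsum_nil (lights : List (List Int)) : gsum lights [] = 0 := by
  simp [gsum]

-- A's accumulating sweep equals the recomputing argmax fold
lemma sweep (lights : List (List Int)) :
    ∀ (ks lo : List Int) (bp : Option Int) (bs s0 : Int),
    (lo ++ ks).Pairwise (· < ·) →
    (∀ l ∈ lights, lft l ∈ lo ++ ks ∧ fin l ∈ lo ++ ks) →
    s0 = gsum lights lo →
    (ks.foldl (fun (st : Option Int × Int × Int) pos =>
        let s := st.2.2 + delta lights pos
        if s > st.2.1 then (some pos, s, s) else (st.1, st.2.1, s)) (bp, bs, s0)).1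
      = (amax (brightness lights) (bp, bs) ks).1 := by
  intro ks
  induction ks with
  | nil => intro lo bp bs s0 _ _ _; rfl
  | cons k tl ih =>
    intro lo bp bs s0 hp hc hs
    have hbk : s0 + delta lights k = brightness lights k := by
      rw [hs]; exact gsum_step lights lo tl k hp hc
    have hp' : ((lo ++ [k]) ++ tl).Pairwise (· < ·) := by
      simpa [List.append_assoc] using hp
    have hc' : ∀ l ∈ lights, lft l ∈ (lo ++ [k]) ++ tl ∧ fin l ∈ (lo ++ [k]) ++ tl := by
      simpa [List.append_assoc] using hc
    have hs' : s0 + delta lights k = gsum lights (lo ++ [k]) := by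
      rw [hbk]; exact (gsum_snoc lights lo tl k hp hc).symm
    rw [List.foldl_cons]
    show (tl.foldl _ (if s0 + delta lights k > bs then (some k, s0 + delta lights k, s0 + delta lights k)
        else (bp, bs, s0 + delta lights k))).1 = (amax (brightness lights) (bp, bs) (k :: tl)).1
    rw [amax, List.foldl_cons]
    show _ = (tl.foldl _ (if brightness lights k > bs then (some k, brightness lights k) else (bp, bs))).1
    by_cases hcond : brightness lights k > bs
    · rw [if_pos (by rw [hbk]; exact hcond), if_pos hcond, ← hbk]
      exact ih (lo ++ [k]) (some k) (s0 + delta lights k) (s0 + delta lights k) hp' hc' hs'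
    · rw [if_neg (by rw [hbk]; exact hcond), if_neg hcond]
      exact ih (lo ++ [k]) bp bs (s0 + delta lights k) hp' hc' hs'


lemma amax_stay (f : Int → Int) :
    ∀ (zs : List Int) (bp : Option Int) (bs : Int),
    (∀ p ∈ zs, f p ≤ bs) → amax f (bp, bs) zs = (bp, bs) := by
  intro zs
  induction zs with
  | nil => intro bp bs _; rfl
  | cons z tl ih =>
    intro bp bs h
    rw [amax, List.foldl_cons]
    show amax f (if f z > bs then (some z, f z) else (bp, bs)) tl = (bp, bs)
    rw [if_neg (not_lt.mpr (h z List.mem_cons_self))]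
    exact ih bp bs (fun p hp => h p (List.mem_cons_of_mem _ hp))

lemma amax_found (f : Int → Int) :
    ∀ (zs : List Int), zs.Pairwise (· ≤ ·) →
    ∀ (bp : Option Int) (bs : Int), (∃ p ∈ zs, bs < f p) →
    ∃ q, (amax f (bp, bs) zs).1 = some q ∧ q ∈ zs ∧ bs < f q ∧
      (∀ p ∈ zs, f p ≤ f q) ∧ (∀ p ∈ zs, f q ≤ f p → q ≤ p) := by
  intro zs
  induction zs with
  | nil => rintro _ bp bs ⟨p, hp, _⟩; exact absurd hp (List.not_mem_nil)
  | cons z tl ih =>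
    intro hs bp bs hex
    obtain ⟨hz, htl⟩ := List.pairwise_cons.mp hs
    rw [amax, List.foldl_cons]
    show ∃ q, (amax f (if f z > bs then (some z, f z) else (bp, bs)) tl).1 = some q ∧ _
    by_cases hbz : bs < f z
    · rw [if_pos hbz]
      by_cases hex2 : ∃ p ∈ tl, f z < f p
      · obtain ⟨q, hq1, hq2, hq3, hq4, hq5⟩ := ih htl (some z) (f z) hex2
        refine ⟨q, hq1, List.mem_cons_of_mem _ hq2, lt_trans hbz hq3, ?_, ?_⟩
        · intro p hmem; rcases List.mem_cons.mp hmem with rfl | hp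
          · exact le_of_lt hq3
          · exact hq4 p hp
        · intro p hmem hfp; rcases List.mem_cons.mp hmem with rfl | hp
          · exact absurd hfp (not_le.mpr hq3)
          · exact hq5 p hp hfp
      · push Not at hex2
        rw [amax_stay f tl (some z) (f z) hex2]
        refine ⟨z, rfl, List.mem_cons_self, hbz, ?_, ?_⟩
        · intro p hmem; rcases List.mem_cons.mp hmem with rfl | hp
          · exact le_refl _
          · exact hex2 p hp
        · intro p hmem _; rcases List.mem_cons.mp hmem with rfl | hp
          · exact le_refl _
          · exact hz p hp
    · rw [if_neg hbz]
      have hex' : ∃ p ∈ tl, bs < f p := by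
        obtain ⟨p, hp, hbp⟩ := hex
        rcases List.mem_cons.mp hp with rfl | hp'
        · exact absurd hbp hbz
        · exact ⟨p, hp', hbp⟩
      obtain ⟨q, hq1, hq2, hq3, hq4, hq5⟩ := ih htl bp bs hex'
      refine ⟨q, hq1, List.mem_cons_of_mem _ hq2, hq3, ?_, ?_⟩
      · intro p hmem; rcases List.mem_cons.mp hmem with rfl | hp
        · exact le_trans (not_lt.mp hbz) (le_of_lt hq3)
        · exact hq4 p hp
      · intro p hmem hfp; rcases List.mem_cons.mp hmem with rfl | hp
        · exact absurd (lt_of_lt_of_le hq3 hfp) (by exact hbz)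
        · exact hq5 p hp hfp

-- any coordinate with positive brightness is dominated by a left endpoint at or before it
lemma dom_left (lights : List (List Int)) (k : Int) (hk : 0 < brightness lights k) :
    ∃ t ∈ lights.map lft, t ≤ k ∧ brightness lights k ≤ brightness lights t := by
  by_cases hS : ((lights.map lft).filter (fun t => decide (t ≤ k))) = []
  · exfalso
    have hno : ∀ l ∈ lights, ¬ lft l ≤ k := by
      intro l hl hle
      have : lft l ∈ (lights.map lft).filter (fun t => decide (t ≤ k)) :=
        List.mem_filter.mpr ⟨List.mem_map_of_mem hl, by simpa using hle⟩
      rw [hS] at this; exact absurd this (List.not_mem_nil)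
    have hle0 : brightness lights k ≤ 0 := by
      rw [brightness_eq]
      calc (lights.map fun l => (if lft l ≤ k then (1:Int) else 0) - if fin l ≤ k then (1:Int) else 0).sum
          ≤ (lights.map fun _ => (0:Int)).sum := by
            apply List.sum_le_sum
            intro l hl
            rw [if_neg (hno l hl)]
            split_ifs <;> omega
        _ = 0 := by simp
    omega
  · obtain ⟨t, hm⟩ := Option.isSome_iff_exists.mp (List.isSome_max?_of_ne_nil hS)
    obtain ⟨htmem, htmax⟩ := List.max?_eq_some_iff.mp hm
    have ht1 : t ∈ lights.map lft := (List.mem_filter.mp htmem).1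
    have ht2 : t ≤ k := by simpa using (List.mem_filter.mp htmem).2
    refine ⟨t, ht1, ht2, ?_⟩
    rw [brightness_eq, brightness_eq]
    apply List.sum_le_sum
    intro l hl
    have hlt : lft l ≤ k → lft l ≤ t := by
      intro hle
      exact htmax _ (List.mem_filter.mpr ⟨List.mem_map_of_mem hl, by simpa using hle⟩)
    split_ifs <;> omega

lemma A_char (lights : List (List Int)) :
    brightestPosition lights
      = (amax (brightness lights) (none, 0)
          (PySem.List.sorted (diffD lights).keys (fun x => x) false)).1.getD 0 := by
  have h0 : brightestPosition lights
      = ((PySem.List.sorted (diffD lights).keys (fun x => x) false).foldl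
          (fun (st : Option Int × Int × Int) pos =>
            let s := st.2.2 + (diffD lights).getD pos 0
            if s > st.2.1 then (some pos, s, s) else (st.1, st.2.1, s)) (none, 0, 0)).1.getD 0 := rfl
  rw [h0]
  congr 1
  have hfun : (fun (st : Option Int × Int × Int) pos =>
        let s := st.2.2 + (diffD lights).getD pos 0
        if s > st.2.1 then (some pos, s, s) else (st.1, st.2.1, s))
      = (fun (st : Option Int × Int × Int) pos =>
        let s := st.2.2 + delta lights pos
        if s > st.2.1 then (some pos, s, s) else (st.1, st.2.1, s)) := by
    funext st pos
    rw [getD_diffD]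
  rw [hfun]
  have hnd : (PySem.List.sorted (diffD lights).keys (fun x => x) false).Nodup :=
    (PySem.List.sorted_perm _ _ _).nodup_iff.mpr (nodup_keys_diffD lights)
  have hle : (PySem.List.sorted (diffD lights).keys (fun x => x) false).Pairwise (· ≤ ·) :=
    PySem.List.sorted_pairwise _ _
  have hp : (PySem.List.sorted (diffD lights).keys (fun x => x) false).Pairwise (· < ·) :=
    (hle.and hnd).imp (fun h => lt_of_le_of_ne h.1 h.2)
  have hc : ∀ l ∈ lights, lft l ∈ PySem.List.sorted (diffD lights).keys (fun x => x) false
      ∧ fin l ∈ PySem.List.sorted (diffD lights).keys (fun x => x) false := by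
    intro l hl
    constructor <;> rw [PySem.List.mem_sorted, mem_keys_diffD] <;>
      [exact ⟨l, hl, Or.inl rfl⟩; exact ⟨l, hl, Or.inr rfl⟩]
  have := sweep lights (PySem.List.sorted (diffD lights).keys (fun x => x) false) [] none 0 0
    (by simpa using hp) (by simpa using hc) (gsum_nil lights).symm
  exact this

lemma B_char (lights : List (List Int)) :
    brightestPosition_alt lights
      = (amax (brightness lights) (none, 0)
          (PySem.List.sorted (lights.map lft) (fun x => x) false)).1.getD 0 := by
  rfl

-- ===== VERDICT (by name: the statement is the Claim_ definition above) =====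
theorem brightestPosition_spec : Claim_equal_brightestPosition := by
  intro lights _ hpre
  unfold Spec_brightestPosition
  obtain ⟨hlen, l0, hl0, hpos⟩ := hpre
  have hfl0 : 0 < brightness lights (lft l0) := hpos
  have hmemL : lft l0 ∈ PySem.List.sorted (lights.map lft) (fun x => x) false :=
    (PySem.List.mem_sorted _ _ _ _).mpr (List.mem_map_of_mem hl0)
  have hmemK : lft l0 ∈ PySem.List.sorted (diffD lights).keys (fun x => x) false :=
    (PySem.List.mem_sorted _ _ _ _).mpr ((mem_keys_diffD lights _).mpr ⟨l0, hl0, Or.inl rfl⟩)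
  obtain ⟨qK, hqK1, hqK2, hqK3, hqK4, hqK5⟩ :=
    amax_found (brightness lights) _ (PySem.List.sorted_pairwise (diffD lights).keys (fun x => x))
      none 0 ⟨lft l0, hmemK, hfl0⟩
  obtain ⟨qL, hqL1, hqL2, hqL3, hqL4, hqL5⟩ :=
    amax_found (brightness lights) _ (PySem.List.sorted_pairwise (lights.map lft) (fun x => x))
      none 0 ⟨lft l0, hmemL, hfl0⟩
  have hLK : ∀ p ∈ PySem.List.sorted (lights.map lft) (fun x => x) false,
      p ∈ PySem.List.sorted (diffD lights).keys (fun x => x) false := by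
    intro p hp
    rw [PySem.List.mem_sorted] at hp
    obtain ⟨l, hl, rfl⟩ := List.mem_map.mp hp
    exact (PySem.List.mem_sorted _ _ _ _).mpr ((mem_keys_diffD lights _).mpr ⟨l, hl, Or.inl rfl⟩)
  obtain ⟨t, htmem, htle, htdom⟩ := dom_left lights qK hqK3
  have htL : t ∈ PySem.List.sorted (lights.map lft) (fun x => x) false :=
    (PySem.List.mem_sorted _ _ _ _).mpr htmem
  have h1 : brightness lights qL ≤ brightness lights qK := hqK4 qL (hLK qL hqL2)
  have h2 : brightness lights t ≤ brightness lights qL := hqL4 t htL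
  have h3 : qL ≤ t := hqL5 t htL (by omega)
  have h4 : qK ≤ qL := hqK5 qL (hLK qL hqL2) (by omega)
  have heq : qK = qL := le_antisymm h4 (le_trans h3 htle)
  rw [A_char, B_char, hqK1, hqL1, heq]
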